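-- pv_equiv track=rewrite | github.com/anatolegosset/Project_Euler | src/project_euler/lib/various_funcs.py | int_permutations
-- ===== SOURCE A (Python) =====
-- from collections import Counter
--
-- def int_from_digit_list(digit_list, base=10, reverse=False):
--     if not reverse:
--         result = 0
--         for digit in digit_list:
--             result *= base
--             result += digit
--     else:
--         factor = 1
--         result = 0
--         for digit in digit_list:
--             result += factor * digit
--             factor *= 10
--     return result
--
-- def int_permutations(n):
--     number_of_digits = len(str(n))
--     result = set()
--     current_path = []
--     possible = Counter([int(i) for i in str(n)])
--
--     def rec_permute():
--         if len(current_path) == number_of_digits: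
--             result.add(int_from_digit_list(current_path))
--         else:
--             for i in possible.keys():
--                 if possible[i] > 0:
--                     current_path.append(i)
--                     possible[i] -= 1
--                     rec_permute()
--                     possible[i] += 1
--                     current_path.pop()
--
--     rec_permute()
--     return sorted(list(result))
-- ===== SOURCE B (Python) =====
-- from itertools import permutations
--
--
-- def int_permutations(n):
--     digits = [int(c) for c in str(n)]
--     seen = set()
--     for perm in permutations(digits):
--         value = 0
--         for d in perm:
--             value = 10 * value + d
--         seen.add(value)
--     return sorted(seen)
-- ===== Notes on version B (the rewrite author's own statement) =====
-- stated objective: idiomatic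
-- what changed: Replaces the Counter-pruned recursive backtracking (which builds each distinct digit ordering exactly once via a mutable path and counter) with the standard-library itertools.permutations over the digit list, deduplicating the folded integer values in a set and sorting at the end.
import Mathlib
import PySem

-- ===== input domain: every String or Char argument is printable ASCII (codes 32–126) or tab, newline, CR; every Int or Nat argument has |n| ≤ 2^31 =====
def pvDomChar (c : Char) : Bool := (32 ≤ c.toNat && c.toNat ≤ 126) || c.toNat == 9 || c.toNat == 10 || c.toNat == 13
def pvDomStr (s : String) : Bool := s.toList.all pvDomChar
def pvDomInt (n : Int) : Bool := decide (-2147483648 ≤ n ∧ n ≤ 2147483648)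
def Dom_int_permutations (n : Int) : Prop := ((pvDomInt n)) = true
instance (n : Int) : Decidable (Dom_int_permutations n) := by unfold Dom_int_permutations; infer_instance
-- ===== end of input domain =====

-- B replaces A's Counter-pruned recursive backtracking with itertools.permutations + set dedup (idiomatic; not faster).

-- ===== PORT A =====
-- int(c) for a single character c; `none` is exactly where Python raises ValueError
-- (reached only via the '-' of a negative n, excluded by Pre_).
def pvCharInt (c : Char) : Int := (PySem.Int.ofChars? [c]).getD 0

-- port of int_from_digit_list (both branches; A calls it with base=10, reverse=False)
def int_from_digit_list (digit_list : List Int) (base : Int) (reverse : Bool) : Int :=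
  if reverse = false then
    digit_list.foldl (fun result digit => result * base + digit) 0
  else
    (digit_list.foldl (fun (fr : Int × Int) digit => (fr.1 * 10, fr.2 + fr.1 * digit)) (1, 0)).2

-- port of the inner rec_permute; fuel = number_of_digits - len(current_path)
def recPermute : Nat → List Int → PySem.Dict Int Int → PySem.Set Int → PySem.Set Int
  | 0, path, _, res => PySem.Set.add res (int_from_digit_list path 10 false)
  | f + 1, path, possible, res =>
    possible.keys.foldl
      (fun r i =>
        if possible.getD i 0 > 0 then
          recPermute f (path ++ [i]) (possible.modify i 0 (· - 1)) r
        else r) res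

def int_permutations (n : Int) : List Int :=
  let s := PySem.Int.toChars n
  let number_of_digits := s.length
  let possible : PySem.Dict Int Int := PySem.Dict.counter (s.map pvCharInt)
  let result := recPermute number_of_digits [] possible PySem.Set.empty
  -- sorted(list(result)): sorting with the identity key, so the set's order is immaterial
  PySem.List.sorted result (fun x => x) false

-- ===== PORT B =====
def int_permutations_alt (n : Int) : List Int :=
  let digits := (PySem.Int.toChars n).map pvCharInt
  let seen := (PySem.List.permutations digits digits.length).foldl
      (fun s p => PySem.Set.add s (p.foldl (fun value d => 10 * value + d) 0))
      PySem.Set.empty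
  PySem.List.sorted seen (fun x => x) false

-- ===== PRECONDITION & SPEC =====
-- Pre_ excludes exactly the negative inputs, on which both Pythons raise ValueError (int of the minus sign character).
def Pre_int_permutations (n : Int) : Prop := 0 ≤ n
instance (n : Int) : Decidable (Pre_int_permutations n) := by unfold Pre_int_permutations; infer_instance
def pvWitness_int_permutations : Int := (121)

def Spec_int_permutations (n : Int) (out : List Int) : Prop := out = int_permutations_alt n
instance (n : Int) (out : List Int) : Decidable (Spec_int_permutations n out) := by unfold Spec_int_permutations; infer_instance

-- ===== CLAIM (what is proved, stated in full; the proofs are below) =====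
def Claim_equal_int_permutations : Prop := ∀ (n : Int), Dom_int_permutations n → Pre_int_permutations n → Spec_int_permutations n (int_permutations n)

-- ===== LEMMAS AND PROOFS =====

-- the digit-fold value both programs accumulate
def pvVal (l : List Int) : Int := l.foldl (fun r d => r * 10 + d) 0

theorem pvVal_eq_A (l : List Int) : int_from_digit_list l 10 false = pvVal l := rfl

theorem pvVal_eq_B (p : List Int) : p.foldl (fun value d => 10 * value + d) 0 = pvVal p := by
  unfold pvVal
  exact PySem.List.foldl_congr_mem p _ _ 0 (by intro acc x _; ring)

-- generic facts about folds over a Set accumulator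
theorem pv_foldl_mono {β : Type} (step : PySem.Set Int → β → PySem.Set Int)
    (hm : ∀ a b, ∀ x ∈ a, x ∈ step a b) :
    ∀ (ks : List β) (acc : PySem.Set Int) (x : Int), x ∈ acc → x ∈ ks.foldl step acc := by
  intro ks
  induction ks with
  | nil => intro acc x hx; exact hx
  | cons k t ih => intro acc x hx; exact ih _ _ (hm _ _ _ hx)

theorem pv_foldl_reach {β : Type} (step : PySem.Set Int → β → PySem.Set Int) (x : Int) (i : β)
    (hm : ∀ a b, ∀ y ∈ a, y ∈ step a b) (hhit : ∀ a, x ∈ step a i) :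
    ∀ (ks : List β), i ∈ ks → ∀ acc, x ∈ ks.foldl step acc := by
  intro ks
  induction ks with
  | nil => intro h; cases h
  | cons k t ih =>
    intro hmem acc
    rcases List.mem_cons.mp hmem with h | h
    · subst h; exact pv_foldl_mono step hm t _ x (hhit acc)
    · exact ih h _

theorem pv_foldl_sound {β : Type} (step : PySem.Set Int → β → PySem.Set Int) (P : β → Prop)
    (x : Int) (hs : ∀ a b, x ∈ step a b → x ∈ a ∨ P b) :
    ∀ (ks : List β) (acc : PySem.Set Int), x ∈ ks.foldl step acc → x ∈ acc ∨ ∃ b ∈ ks, P b := by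
  intro ks
  induction ks with
  | nil => intro acc hx; exact Or.inl hx
  | cons k t ih =>
    intro acc hx
    rcases ih _ hx with h | ⟨b, hb, hP⟩
    · rcases hs _ _ h with h' | h'
      · exact Or.inl h'
      · exact Or.inr ⟨k, List.mem_cons_self, h'⟩
    · exact Or.inr ⟨b, List.mem_cons_of_mem _ hb, hP⟩

theorem pv_foldl_nodup {β : Type} (step : PySem.Set Int → β → PySem.Set Int)
    (hstep : ∀ a b, a.Nodup → (step a b).Nodup) :
    ∀ (ks : List β) (acc : PySem.Set Int), acc.Nodup → (ks.foldl step acc).Nodup := by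
  intro ks
  induction ks with
  | nil => intro acc h; exact h
  | cons k t ih => intro acc h; exact ih _ (hstep _ _ h)

theorem recPermute_mono : ∀ (fuel : Nat) (path : List Int) (poss : PySem.Dict Int Int)
    (res : PySem.Set Int) (x : Int), x ∈ res → x ∈ recPermute fuel path poss res := by
  intro fuel
  induction fuel with
  | zero =>
    intro path poss res x hx
    simp only [recPermute]
    exact (PySem.Set.mem_add _ _ _).mpr (Or.inl hx)
  | succ f ih =>
    intro path poss res x hx
    simp only [recPermute]
    refine pv_foldl_mono _ ?_ _ _ _ hx
    intro a b y hy
    dsimp only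
    split
    · exact ih _ _ _ _ hy
    · exact hy

theorem recPermute_nodup : ∀ (fuel : Nat) (path : List Int) (poss : PySem.Dict Int Int)
    (res : PySem.Set Int), res.Nodup → (recPermute fuel path poss res).Nodup := by
  intro fuel
  induction fuel with
  | zero =>
    intro path poss res h
    simp only [recPermute]
    exact PySem.Set.nodup_add _ _ h
  | succ f ih =>
    intro path poss res h
    simp only [recPermute]
    refine pv_foldl_nodup _ ?_ _ _ h
    intro a b ha
    dsimp only
    split
    · exact ih _ _ _ ha
    · exact ha

-- counts of the decremented counter = counts of m.erase i
theorem pv_counts_erase (m : List Int) (poss : PySem.Dict Int Int) (i : Int)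
    (hcnt : ∀ v, (m.count v : Int) = poss.getD v 0) (hi : i ∈ m) :
    ∀ v, ((m.erase i).count v : Int) = (poss.modify i 0 (· - 1)).getD v 0 := by
  intro v
  rw [PySem.Dict.getD_modify]
  by_cases hv : v = i
  · subst hv
    rw [List.count_erase]
    simp only [BEq.rfl, if_true]
    have h1 : 1 ≤ m.count v := List.count_pos_iff.mpr hi
    rw [← hcnt v]
    omega
  · have hne : (i == v) = false := by simp [Ne.symm hv]
    rw [List.count_erase, hne]
    simpa [hv] using hcnt v

theorem recPermute_sound : ∀ (fuel : Nat) (m path : List Int) (poss : PySem.Dict Int Int)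
    (res : PySem.Set Int) (x : Int),
    m.length = fuel → (∀ v, (m.count v : Int) = poss.getD v 0) →
    x ∈ recPermute fuel path poss res →
    x ∈ res ∨ ∃ l : List Int, l.Perm m ∧ x = pvVal (path ++ l) := by
  intro fuel
  induction fuel with
  | zero =>
    intro m path poss res x hlen hcnt hx
    have hm : m = [] := List.eq_nil_of_length_eq_zero hlen
    simp only [recPermute] at hx
    rcases (PySem.Set.mem_add _ _ _).mp hx with h | h
    · exact Or.inl h
    · refine Or.inr ⟨[], by simp [hm], ?_⟩
      rw [h, pvVal_eq_A]
      simp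
  | succ f ih =>
    intro m path poss res x hlen hcnt hx
    simp only [recPermute] at hx
    have hsound := pv_foldl_sound _
      (fun i => poss.getD i 0 > 0 ∧ ∃ l', l'.Perm (m.erase i) ∧ x = pvVal (path ++ i :: l'))
      x ?_ _ _ hx
    · rcases hsound with h | ⟨i, _, hpos, l', hperm, hval⟩
      · exact Or.inl h
      · have him : i ∈ m := by
          have := hcnt i
          have : 0 < m.count i := by omega
          exact List.count_pos_iff.mp this
        refine Or.inr ⟨i :: l', ?_, hval⟩
        exact (List.cons_perm_iff_perm_erase).mpr ⟨him, hperm⟩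
    · intro a i hstep
      replace hstep : x ∈ if poss.getD i 0 > 0 then
          recPermute f (path ++ [i]) (poss.modify i 0 (· - 1)) a else a := hstep
      by_cases hc : poss.getD i 0 > 0
      · rw [if_pos hc] at hstep
        have him : i ∈ m := by
          have := hcnt i
          have : 0 < m.count i := by omega
          exact List.count_pos_iff.mp this
        have hlen' : (m.erase i).length = f := by
          rw [List.length_erase_of_mem him]; omega
        rcases ih (m.erase i) (path ++ [i]) _ a x hlen' (pv_counts_erase m poss i hcnt him) hstep with
          h | ⟨l', hp, hv⟩
        · exact Or.inl h
        · refine Or.inr ⟨hc, l', hp, ?_⟩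
          rw [hv, List.append_assoc]
          rfl
      · rw [if_neg hc] at hstep
        exact Or.inl hstep

theorem recPermute_complete : ∀ (fuel : Nat) (m path : List Int) (poss : PySem.Dict Int Int)
    (res : PySem.Set Int) (x : Int) (l : List Int),
    m.length = fuel → (∀ v, (m.count v : Int) = poss.getD v 0) →
    l.Perm m → x = pvVal (path ++ l) → x ∈ recPermute fuel path poss res := by
  intro fuel
  induction fuel with
  | zero =>
    intro m path poss res x l hlen hcnt hp hv
    have hm : m = [] := List.eq_nil_of_length_eq_zero hlen
    have hl : l = [] := List.perm_nil.mp (hm ▸ hp)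
    simp only [recPermute]
    refine (PySem.Set.mem_add _ _ _).mpr (Or.inr ?_)
    rw [hv, hl, pvVal_eq_A]
    simp
  | succ f ih =>
    intro m path poss res x l hlen hcnt hp hv
    have hllen : l.length = f + 1 := by rw [hp.length_eq, hlen]
    cases l with
    | nil => simp at hllen
    | cons i l' =>
      obtain ⟨him, hp'⟩ := (List.cons_perm_iff_perm_erase).mp hp
      have hpos : poss.getD i 0 > 0 := by
        have h1 : 0 < m.count i := List.count_pos_iff.mpr him
        have := hcnt i
        omega
      have hkey : i ∈ poss.keys := by
        refine (PySem.Dict.contains_iff_mem_keys _ _).mp ?_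
        by_contra hc
        have : poss.contains i = false := by
          cases h : poss.contains i
          · rfl
          · exact absurd h hc
        have := PySem.Dict.getD_of_not_contains poss (0 : Int) this
        omega
      have hlen' : (m.erase i).length = f := by
        rw [List.length_erase_of_mem him]; omega
      simp only [recPermute]
      refine pv_foldl_reach _ x i ?_ ?_ _ hkey _
      · intro a b y hy
        dsimp only
        split
        · exact recPermute_mono _ _ _ _ _ hy
        · exact hy
      · intro a
        show x ∈ if poss.getD i 0 > 0 then
            recPermute f (path ++ [i]) (poss.modify i 0 (· - 1)) a else a
        rw [if_pos hpos]
        refine ih (m.erase i) (path ++ [i]) _ a x l' hlen'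
          (pv_counts_erase m poss i hcnt him) hp' ?_
        rw [hv, List.append_assoc]
        rfl

-- membership in A's result set
theorem pv_Aset_mem (ds : List Int) (x : Int) :
    x ∈ recPermute ds.length [] (PySem.Dict.counter ds) PySem.Set.empty ↔
      ∃ l : List Int, l.Perm ds ∧ x = pvVal l := by
  constructor
  · intro hx
    rcases recPermute_sound ds.length ds [] _ _ x rfl
        (fun v => by rw [PySem.Dict.getD_counter]) hx with h | ⟨l, hp, hv⟩
    · cases h
    · exact ⟨l, hp, by simpa using hv⟩
  · rintro ⟨l, hp, hv⟩
    exact recPermute_complete ds.length ds [] _ _ x l rfl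
      (fun v => by rw [PySem.Dict.getD_counter]) hp (by simpa using hv)

-- membership in B's seen set
theorem pv_seen_mem {β : Type} (f : β → Int) :
    ∀ (ps : List β) (acc : PySem.Set Int) (x : Int),
      x ∈ ps.foldl (fun s p => PySem.Set.add s (f p)) acc ↔ x ∈ acc ∨ ∃ p ∈ ps, x = f p := by
  intro ps
  induction ps with
  | nil => intro acc x; simp
  | cons q t ih =>
    intro acc x
    rw [List.foldl_cons, ih]
    rw [PySem.Set.mem_add]
    constructor
    · rintro (⟨h | h⟩ | ⟨p, hp, hv⟩)
      · exact Or.inl h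
      · exact Or.inr ⟨q, List.mem_cons_self, h⟩
      · exact Or.inr ⟨p, List.mem_cons_of_mem _ hp, hv⟩
    · rintro (h | ⟨p, hp, hv⟩)
      · exact Or.inl (Or.inl h)
      · rcases List.mem_cons.mp hp with h' | h'
        · subst h'; exact Or.inl (Or.inr hv)
        · exact Or.inr ⟨p, h', hv⟩

-- every rearrangement of xs occurs in itertools.permutations(xs, len(xs))
theorem pv_mem_permutations_of_perm : ∀ (r : Nat) (xs p : List Int),
    xs.length = r → p.Perm xs → p ∈ PySem.List.permutations xs r := by
  intro r
  induction r with
  | zero =>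
    intro xs p hlen hp
    have hxs : xs = [] := List.eq_nil_of_length_eq_zero hlen
    have : p = [] := List.perm_nil.mp (hxs ▸ hp)
    rw [PySem.List.permutations_zero, this]
    simp
  | succ r ih =>
    intro xs p hlen hp
    have hplen : p.length = r + 1 := by rw [hp.length_eq, hlen]
    cases p with
    | nil => simp at hplen
    | cons a p' =>
      obtain ⟨ha, hp'⟩ := (List.cons_perm_iff_perm_erase).mp hp
      have hi : xs.idxOf a < xs.length := List.idxOf_lt_length_of_mem ha
      rw [PySem.List.permutations]
      rw [List.mem_flatMap]
      refine ⟨xs.idxOf a, List.mem_range.mpr hi, ?_⟩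
      rw [List.getElem?_idxOf ha]
      rw [List.eraseIdx_idxOf_eq_erase]
      refine List.mem_map.mpr ⟨p', ?_, rfl⟩
      refine ih (xs.erase a) p' ?_ hp'
      rw [List.length_erase_of_mem ha]
      omega

-- ===== VERDICT (by name: the statement is the Claim_ definition above) =====
theorem int_permutations_spec : Claim_equal_int_permutations := by
  intro n _ _
  show PySem.List.sorted
      (recPermute (PySem.Int.toChars n).length []
        (PySem.Dict.counter ((PySem.Int.toChars n).map pvCharInt)) PySem.Set.empty)
      (fun x => x) false =
    PySem.List.sorted
      (((PySem.List.permutations ((PySem.Int.toChars n).map pvCharInt)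
          ((PySem.Int.toChars n).map pvCharInt).length)).foldl
        (fun s p => PySem.Set.add s (p.foldl (fun value d => 10 * value + d) 0))
        PySem.Set.empty)
      (fun x => x) false
  set ds := (PySem.Int.toChars n).map pvCharInt with hds
  have hlen : (PySem.Int.toChars n).length = ds.length := by simp [hds]
  rw [hlen]
  refine PySem.List.sorted_eq_sorted_of_perm _ _ _ (fun a b h => h) ?_
  refine (List.perm_ext_iff_of_nodup ?_ ?_).mpr ?_
  · exact recPermute_nodup _ _ _ _ List.nodup_nil
  · exact pv_foldl_nodup _ (fun a b ha => PySem.Set.nodup_add _ _ ha) _ _ List.nodup_nil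
  · intro x
    rw [pv_Aset_mem, pv_seen_mem]
    constructor
    · rintro ⟨l, hp, hv⟩
      refine Or.inr ⟨l, pv_mem_permutations_of_perm _ _ _ rfl hp, ?_⟩
      rw [pvVal_eq_B]
      exact hv
    · rintro (h | ⟨p, hmem, hv⟩)
      · cases h
      · exact ⟨p, PySem.List.perm_of_mem_permutations hmem, by rw [hv, pvVal_eq_B]⟩
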